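-- pv_equiv track=rewrite | github.com/miliar/Code_Jam_Webscraper | solutions_python/Problem_178/1420.py | solve
-- ===== SOURCE A (Python) =====
-- def solve(pancake):
-- 	flip_num = 0
-- 	for i in range(1, len(pancake)):
-- 		if pancake[i-1] != pancake[i]:
-- 			flip_num += 1
-- 	if pancake[-1] == '-':
-- 		flip_num += 1
-- 	return flip_num
-- ===== SOURCE B (Python) =====
-- def solve(pancake):
--     # Divide and conquer: transitions in pancake[lo:hi] split at the midpoint.
--     def trans(lo, hi):
--         if hi - lo <= 1:
--             return 0
--         mid = (lo + hi) // 2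
--         return trans(lo, mid) + trans(mid, hi) + (pancake[mid - 1] != pancake[mid])
--     return trans(0, len(pancake)) + (pancake[-1] == '-')
-- ===== Notes on version B (the rewrite author's own statement) =====
-- stated objective: alternative
-- what changed: B computes the number of adjacent unequal pairs by divide and conquer (recursively splitting the index interval at its midpoint and adding the one boundary comparison) instead of A's single left-to-right index loop, then adds one if the last character is '-'.
import Mathlib
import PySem

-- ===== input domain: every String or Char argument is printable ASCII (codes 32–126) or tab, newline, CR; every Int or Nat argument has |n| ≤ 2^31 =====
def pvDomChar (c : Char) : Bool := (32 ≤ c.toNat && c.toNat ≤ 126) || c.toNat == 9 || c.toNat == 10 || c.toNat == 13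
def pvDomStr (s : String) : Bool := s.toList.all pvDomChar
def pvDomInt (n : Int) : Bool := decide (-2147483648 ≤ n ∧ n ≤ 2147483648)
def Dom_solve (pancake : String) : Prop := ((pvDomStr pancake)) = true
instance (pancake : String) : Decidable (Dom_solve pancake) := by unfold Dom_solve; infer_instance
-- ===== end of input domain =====

-- B counts adjacent unequal pairs by midpoint divide-and-conquer on the index interval instead of A's left-to-right index loop; alternative decomposition, same cost.


-- ===== PORT A =====
def solve (pancake : String) : Int :=
  let cs := pancake.toList
  let flip_num : Int :=
    (PySem.List.pyRange 1 (cs.length : Int) 1).foldl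
      (fun acc i =>
        if PySem.List.pyGetD cs (i - 1) ' ' ≠ PySem.List.pyGetD cs i ' ' then acc + 1 else acc) 0
  if PySem.List.pyGet? cs (-1) = some '-' then flip_num + 1 else flip_num

-- ===== PORT B =====
-- trans(lo, hi) of Source B; lo, hi are always nonnegative Python ints (0 ≤ lo ≤ hi ≤ len),
-- so Nat with Nat division is exact for (lo + hi) // 2, and both indices mid-1, mid are
-- in range, so pyGetD with a default is exact for pancake[mid-1] / pancake[mid].
def transB (cs : List Char) (lo hi : Nat) : Int :=
  if hi - lo ≤ 1 then 0
  else
    transB cs lo ((lo + hi) / 2) + transB cs ((lo + hi) / 2) hi +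
      (if PySem.List.pyGetD cs ((((lo + hi) / 2 : Nat) : Int) - 1) ' '
            ≠ PySem.List.pyGetD cs (((lo + hi) / 2 : Nat) : Int) ' ' then 1 else 0)
  termination_by hi - lo
  decreasing_by all_goals omega

def solve_alt (pancake : String) : Int :=
  let cs := pancake.toList
  transB cs 0 cs.length +
    (if PySem.List.pyGet? cs (-1) = some '-' then 1 else 0)

-- ===== PRECONDITION & SPEC =====
-- Pre_ excludes only the empty string, on which both A and B raise IndexError at pancake[-1].
def Pre_solve (pancake : String) : Prop := pancake ≠ ""
instance (pancake : String) : Decidable (Pre_solve pancake) := by unfold Pre_solve; infer_instance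
def pvWitness_solve : String := "-+-"

def Spec_solve (pancake : String) (out : Int) : Prop := out = solve_alt pancake
instance (pancake : String) (out : Int) : Decidable (Spec_solve pancake out) := by unfold Spec_solve; infer_instance

-- ===== CLAIM (what is proved, stated in full; the proofs are below) =====
def Claim_equal_solve : Prop := ∀ (pancake : String), Dom_solve pancake → Pre_solve pancake → Spec_solve pancake (solve pancake)

-- ===== LEMMAS AND PROOFS =====

-- the 0/1 indicator of a transition at position i
def gT (cs : List Char) (i : Int) : Int :=
  if PySem.List.pyGetD cs (i - 1) ' ' ≠ PySem.List.pyGetD cs i ' ' then 1 else 0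

-- number of transitions at positions in [a, b), as a sum
def FT (cs : List Char) (a b : Int) : Int :=
  ((PySem.List.pyRange a b 1).map (gT cs)).sum

theorem FT_split (cs : List Char) (a m b : Int) (h1 : a ≤ m) (h2 : m ≤ b) :
    FT cs a b = FT cs a m + FT cs m b := by
  unfold FT
  rw [PySem.List.pyRange_one_append a m b h1 h2, List.map_append, List.sum_append]

theorem FT_cons (cs : List Char) (m b : Int) (h : m < b) :
    FT cs m b = gT cs m + FT cs (m + 1) b := by
  unfold FT
  rw [PySem.List.pyRange_one_cons h, List.map_cons, List.sum_cons]

theorem transB_eq_FT (cs : List Char) (lo hi : Nat) :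
    transB cs lo hi = FT cs ((lo : Int) + 1) (hi : Int) := by
  induction lo, hi using transB.induct with
  | case1 lo hi h =>
    rw [transB, if_pos h]
    unfold FT
    rw [PySem.List.pyRange_one_eq_nil (by omega)]
    simp
  | case2 lo hi h ih1 ih2 =>
    rw [transB, if_neg h]
    have hm : lo + 1 ≤ (lo + hi) / 2 ∧ (lo + hi) / 2 < hi := by omega
    rw [ih1, ih2]
    rw [FT_split cs ((lo : Int) + 1) (((lo + hi) / 2 : Nat) : Int) (hi : Int)
        (by push_cast; omega) (by push_cast; omega)]
    rw [FT_cons cs (((lo + hi) / 2 : Nat) : Int) (hi : Int) (by push_cast; omega)]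
    unfold gT
    ring

theorem foldA_eq_FT (cs : List Char) :
    (PySem.List.pyRange 1 (cs.length : Int) 1).foldl
      (fun acc i =>
        if PySem.List.pyGetD cs (i - 1) ' ' ≠ PySem.List.pyGetD cs i ' ' then acc + 1 else acc) 0
      = FT cs 1 (cs.length : Int) := by
  have hstep :
      (fun (acc : Int) (i : Int) =>
        if PySem.List.pyGetD cs (i - 1) ' ' ≠ PySem.List.pyGetD cs i ' ' then acc + 1 else acc)
      = (fun (acc : Int) (i : Int) => acc + gT cs i) := by
    funext acc i
    unfold gT
    split <;> ring
  rw [hstep, PySem.List.foldl_add _ (gT cs) 0]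
  unfold FT
  ring

-- ===== VERDICT (by name: the statement is the Claim_ definition above) =====
theorem solve_spec : Claim_equal_solve := by
  intro pancake _ _
  show solve pancake = solve_alt pancake
  simp only [solve, solve_alt]
  rw [foldA_eq_FT, transB_eq_FT]
  norm_num
  split_ifs <;> ring
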